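-- pv_equiv track=rewrite | github.com/CuiXiangTuT/MyFeapderSpiderCode | MyVirtualCode/MyLocalServerCode/MyLocalTestCode/MyTest/my_test.py | get_text_between_dots
-- ===== SOURCE A (Python) =====
-- def get_text_between_dots(data):
--     texts = []
--     dot_count = 0
--
--     for item in data:
--         if isinstance(item, dict) and "text" in item:
--             text = item["text"]
--             if text == ".":
--                 dot_count += 1
--             elif dot_count == 1:
--                 texts.append(text)
--
--     return texts
-- ===== SOURCE B (Python) =====
-- def get_text_between_dots(data):
--     vals = [item["text"] for item in data if isinstance(item, dict) and "text" in item]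
--     dots = [i for i, v in enumerate(vals) if v == "."]
--     if not dots:
--         return []
--     start = dots[0] + 1
--     end = dots[1] if len(dots) > 1 else len(vals)
--     return vals[start:end]
-- ===== Notes on version B (the rewrite author's own statement) =====
-- stated objective: simpler
-- what changed: Replaces A's running dot-counter state machine with a declarative pipeline: extract the list of text values, collect the indices of the '.' sentinels, and return a single slice between the first and second dot (to the end if only one dot, empty if none).
import Mathlib
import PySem

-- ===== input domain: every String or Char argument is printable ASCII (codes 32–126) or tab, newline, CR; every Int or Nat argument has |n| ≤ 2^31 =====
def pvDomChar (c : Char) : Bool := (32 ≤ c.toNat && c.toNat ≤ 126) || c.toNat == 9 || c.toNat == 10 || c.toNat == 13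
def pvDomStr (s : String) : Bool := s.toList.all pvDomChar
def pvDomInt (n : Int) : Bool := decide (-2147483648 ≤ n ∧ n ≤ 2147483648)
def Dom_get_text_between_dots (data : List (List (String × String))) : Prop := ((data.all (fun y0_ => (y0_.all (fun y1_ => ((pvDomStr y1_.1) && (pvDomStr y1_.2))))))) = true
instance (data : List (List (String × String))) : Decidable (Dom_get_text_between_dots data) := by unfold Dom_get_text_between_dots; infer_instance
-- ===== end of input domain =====

-- B replaces A's running dot-counter state machine by a filter + dot-index lookup + one slice (objective: simpler).

-- ===== PORT A =====
-- A's loop: state (texts, dot_count); each dict item with a "text" key updates the state.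
def get_text_between_dots (data : List (List (String × String))) : List String :=
  (data.foldl
    (fun (st : List String × Int) item =>
      match (PySem.Dict.mk item).get? "text" with
      | some text =>
        if text == "." then (st.1, st.2 + 1)
        else if st.2 == 1 then (st.1 ++ [text], st.2)
        else st
      | none => st)
    (([] : List String), (0 : Int))).1

-- ===== PORT B =====
-- vals = [item["text"] for item in data if "text" in item]
-- dots = [i for i, v in enumerate(vals) if v == "."]; slice between first and second dot.
def get_text_between_dots_alt (data : List (List (String × String))) : List String :=
  let vals := data.filterMap (fun item => (PySem.Dict.mk item).get? "text")
  let dots := (PySem.List.enumerate vals 0).filterMap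
      (fun p => if p.2 == "." then some p.1 else none)
  match dots with
  | [] => []
  | d0 :: rest =>
    let start := d0 + 1
    let stop := match rest with
                | d1 :: _ => d1
                | [] => (vals.length : Int)
    PySem.List.slice vals (some start) (some stop)

-- ===== PRECONDITION & SPEC =====
def Spec_get_text_between_dots (data : List (List (String × String))) (out : List String) : Prop := out = get_text_between_dots_alt data
instance (data : List (List (String × String))) (out : List String) : Decidable (Spec_get_text_between_dots data out) := by unfold Spec_get_text_between_dots; infer_instance

-- ===== CLAIM (what is proved, stated in full; the proofs are below) =====
def Claim_equal_get_text_between_dots : Prop := ∀ (data : List (List (String × String))), Dom_get_text_between_dots data → Spec_get_text_between_dots data (get_text_between_dots data)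

-- ===== LEMMAS AND PROOFS =====

-- A's loop step, at the level of the extracted text values.
def pvStep (st : List String × Int) (text : String) : List String × Int :=
  if text == "." then (st.1, st.2 + 1)
  else if st.2 == 1 then (st.1 ++ [text], st.2)
  else st

-- dots of vals, with enumeration starting at s
def pvDots (vals : List String) (s : Int) : List Int :=
  (PySem.List.enumerate vals s).filterMap (fun p => if p.2 == "." then some p.1 else none)

-- the predicate "is not a dot"
def pvNd (v : String) : Bool := !(v == ".")

lemma pvDots_cons (v : String) (vs : List String) (s : Int) :
    pvDots (v :: vs) s = (if v == "." then [s] else []) ++ pvDots vs (s + 1) := by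
  simp only [pvDots, PySem.List.enumerate_cons, List.filterMap_cons]
  split_ifs with h <;> simp [h]

-- A's fold over data factors through the extracted values.
lemma foldA_factor (data : List (List (String × String))) (st : List String × Int) :
    data.foldl
      (fun (st : List String × Int) item =>
        match (PySem.Dict.mk item).get? "text" with
        | some text =>
          if text == "." then (st.1, st.2 + 1)
          else if st.2 == 1 then (st.1 ++ [text], st.2)
          else st
        | none => st) st
    = (data.filterMap (fun item => (PySem.Dict.mk item).get? "text")).foldl pvStep st := by
  induction data generalizing st with
  | nil => rfl
  | cons item rest ih =>
    simp only [List.foldl_cons, List.filterMap_cons]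
    cases h : (PySem.Dict.mk item).get? "text" with
    | none => simpa [h] using ih st
    | some t =>
      simp only [h]
      have := ih (pvStep st t)
      simpa [pvStep] using this

lemma foldStep_ge2 (vals : List String) (acc : List String) (c : Int) (hc : 2 ≤ c) :
    (vals.foldl pvStep (acc, c)).1 = acc := by
  induction vals generalizing c with
  | nil => rfl
  | cons v vs ih =>
    by_cases hv : v == "."
    · simp only [List.foldl_cons, pvStep, hv, if_pos]
      exact ih (c + 1) (by omega)
    · simp only [List.foldl_cons, pvStep, hv]
      rw [if_neg (by simp), if_neg (by simp; omega)]
      exact ih c hc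

lemma foldStep_one (vals : List String) (acc : List String) :
    (vals.foldl pvStep (acc, 1)).1 = acc ++ vals.takeWhile pvNd := by
  induction vals generalizing acc with
  | nil => simp
  | cons v vs ih =>
    by_cases hv : v == "."
    · simp only [List.foldl_cons, pvStep, hv, if_pos]
      have h2 : (1 : Int) + 1 = 2 := by norm_num
      rw [h2, foldStep_ge2 vs acc 2 (by omega)]
      simp [pvNd, hv]
    · simp only [List.foldl_cons, pvStep, hv, List.takeWhile_cons, pvNd]
      rw [if_neg (by simp), if_pos (by simp), ih]
      simp [hv, pvNd]

lemma foldStep_zero (vals : List String) (acc : List String) :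
    (vals.foldl pvStep (acc, 0)).1
      = acc ++ ((vals.dropWhile pvNd).tail.takeWhile pvNd) := by
  induction vals generalizing acc with
  | nil => simp
  | cons v vs ih =>
    by_cases hv : v == "."
    · simp only [List.foldl_cons, pvStep, hv, if_pos]
      have h1 : (0 : Int) + 1 = 1 := by norm_num
      rw [h1, foldStep_one vs acc]
      simp [pvNd, hv]
    · simp only [List.foldl_cons, pvStep, hv, List.dropWhile_cons, pvNd]
      rw [if_neg (by simp), if_neg (by simp), ih]
      simp [hv, pvNd]

lemma pvDots_all_nodot (vals : List String) (s : Int)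
    (h : ∀ v ∈ vals, pvNd v = true) : pvDots vals s = [] := by
  induction vals generalizing s with
  | nil => rfl
  | cons v vs ih =>
    rw [pvDots_cons]
    have hv : ¬ (v == ".") = true := by have := h v (by simp); simpa [pvNd] using this
    simp only [hv, if_false]
    exact ih (s + 1) (fun v hv => h v (by simp [hv]))

lemma pvDots_nodot_prefix (t rest : List String) (s : Int)
    (h : ∀ v ∈ t, pvNd v = true) :
    pvDots (t ++ "." :: rest) s = (s + t.length) :: pvDots rest (s + t.length + 1) := by
  induction t generalizing s with
  | nil =>
    simp only [List.nil_append]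
    rw [pvDots_cons]
    simp
  | cons v vs ih =>
    rw [List.cons_append, pvDots_cons]
    have hv : ¬ (v == ".") = true := by have := h v (by simp); simpa [pvNd] using this
    simp only [hv, if_false]
    rw [ih (s + 1) (fun v hv => h v (by simp [hv]))]
    have e1 : s + 1 + (vs.length : Int) = s + ((v :: vs).length : Int) := by simp; ring
    rw [e1]
    simp

-- one step of the structure of pvDots: head = s + length of the non-dot prefix
lemma pvDots_spec (vals : List String) (s : Int) :
    pvDots vals s =
      match vals.dropWhile pvNd with
      | [] => []
      | _ :: tl => (s + ((vals.takeWhile pvNd).length : Int)) ::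
                     pvDots tl (s + ((vals.takeWhile pvNd).length : Int) + 1) := by
  rcases hdw : vals.dropWhile pvNd with _ | ⟨h0, tl⟩
  · rw [List.dropWhile_eq_nil_iff] at hdw
    exact pvDots_all_nodot vals s hdw
  · have hh0 : h0 = "." := by
      have := List.head_dropWhile_not pvNd (l := vals) (by simp [hdw])
      simp_all [pvNd]
    have hsplit : vals = vals.takeWhile pvNd ++ "." :: tl := by
      conv_lhs => rw [← List.takeWhile_append_dropWhile (p := pvNd) (l := vals)]
      rw [hdw, hh0]
    conv_lhs => rw [hsplit]
    rw [pvDots_nodot_prefix _ _ _ (fun v hv => List.mem_takeWhile_imp hv)]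

-- Core: B's dot-index/slice computation equals the takeWhile/dropWhile form of A's loop.
lemma core (vals : List String) :
    (match pvDots vals 0 with
     | [] => []
     | d0 :: rest =>
       PySem.List.slice vals (some (d0 + 1))
         (some (match rest with | d1 :: _ => d1 | [] => (vals.length : Int))))
    = (vals.dropWhile pvNd).tail.takeWhile pvNd := by
  rcases hdw : vals.dropWhile pvNd with _ | ⟨h0, tl⟩
  · rw [pvDots_spec, hdw]
    simp
  · have hh0 : h0 = "." := by
      have := List.head_dropWhile_not pvNd (l := vals) (by simp [hdw])
      simp_all [pvNd]
    have hsplit : vals = vals.takeWhile pvNd ++ "." :: tl := by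
      conv_lhs => rw [← List.takeWhile_append_dropWhile (p := pvNd) (l := vals)]
      rw [hdw, hh0]
    set t := vals.takeWhile pvNd with ht
    have hdrop : vals.drop (t.length + 1) = tl := by
      have hsplit' : vals = (t ++ ["."]) ++ tl := by rw [hsplit]; simp
      conv_lhs => rw [hsplit']
      have hl : t.length + 1 = (t ++ ["."]).length := by simp
      rw [hl, List.drop_left]
    rw [pvDots_spec, hdw, ← ht, List.tail_cons]
    dsimp only
    rcases hdw2 : tl.dropWhile pvNd with _ | ⟨h2, tl2⟩
    · -- no second dot: slice to the end, which is all of tl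
      rw [pvDots_spec (vals := tl), hdw2]
      have hall : ∀ v ∈ tl, pvNd v = true := List.dropWhile_eq_nil_iff.mp hdw2
      have htake : tl.takeWhile pvNd = tl := List.takeWhile_eq_self_iff.mpr hall
      have hlen : vals.length = t.length + 1 + tl.length := by
        conv_lhs => rw [hsplit]
        simp
        omega
      have hc : (0 : Int) + (t.length : Int) + 1 = ((t.length + 1 : Nat) : Int) := by push_cast; ring
      rw [hc, hlen, PySem.List.slice_natCast, hdrop, htake]
      rw [List.take_of_length_le (by omega)]
    · -- second dot found: slice up to its index
      have hc1 : (0 : Int) + (t.length : Int) + 1 = ((t.length + 1 : Nat) : Int) := by push_cast; ring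
      rw [pvDots_spec (vals := tl), hdw2, hc1]
      dsimp only
      have hc2 : ((t.length + 1 : Nat) : Int) + ((tl.takeWhile pvNd).length : Int)
          = ((t.length + 1 + (tl.takeWhile pvNd).length : Nat) : Int) := by push_cast; ring
      rw [hc2, PySem.List.slice_natCast, hdrop]
      have : t.length + 1 + (tl.takeWhile pvNd).length - (t.length + 1) = (tl.takeWhile pvNd).length := by omega
      rw [this]
      exact ((List.prefix_iff_eq_take).mp (List.takeWhile_prefix pvNd)).symm

-- ===== VERDICT (by name: the statement is the Claim_ definition above) =====
theorem get_text_between_dots_spec : Claim_equal_get_text_between_dots := by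
  intro data _
  unfold Spec_get_text_between_dots get_text_between_dots get_text_between_dots_alt
  rw [foldA_factor, foldStep_zero]
  simp only [List.nil_append]
  rw [← core (data.filterMap (fun item => (PySem.Dict.mk item).get? "text"))]
  rfl
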